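-- pv_equiv track=rewrite | github.com/shouldsee/CA_tfmat | tca2ps.py | tca2ps
-- ===== SOURCE A (Python) =====
-- def tca2ps(rnum):
-- 	r=bin(int(rnum));
-- 	r=r[:1:-1];
-- 	r+='0'*(18-len(r));
--
-- 	rule=[i for x,i in zip(r,range(len(r))) if x=='1'];
--
-- 	alias='b';
--
-- 	ps=1;
-- 	for a in rule:
-- 		if a>8 and ps:
-- 			alias+='s';
-- 			ps=0;
-- 		alias+=str((a)%9)
-- 	if ps==1:
-- 		alias+='s';
-- 	return(alias)
-- ===== SOURCE B (Python) =====
-- def tca2ps(rnum):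
--     n = abs(int(rnum))
--
--     def chunk_digits(m, d):
--         # digits of one base-512 chunk, recursively peeling bits with divmod
--         if m == 0:
--             return ''
--         m2, bit = divmod(m, 2)
--         return (str(d) if bit else '') + chunk_digits(m2, d + 1)
--
--     rest, low = divmod(n, 512)
--     alias = 'b' + chunk_digits(low, 0) + 's'
--     while rest:
--         rest, c = divmod(rest, 512)
--         alias += chunk_digits(c, 0)
--     return alias
-- ===== Notes on version B (the rewrite author's own statement) =====
-- stated objective: alternative
-- what changed: B drops A's reversed-bin-string trick, zip-indexed comprehension and 's'-flag state machine and instead decomposes n arithmetically: divmod splits it into base-512 chunks (birth chunk, then survive chunks) and a recursive divmod-by-2 helper turns each chunk into its digit string, so the 's' separator sits at a fixed place and no flag is needed.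
import Mathlib
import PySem

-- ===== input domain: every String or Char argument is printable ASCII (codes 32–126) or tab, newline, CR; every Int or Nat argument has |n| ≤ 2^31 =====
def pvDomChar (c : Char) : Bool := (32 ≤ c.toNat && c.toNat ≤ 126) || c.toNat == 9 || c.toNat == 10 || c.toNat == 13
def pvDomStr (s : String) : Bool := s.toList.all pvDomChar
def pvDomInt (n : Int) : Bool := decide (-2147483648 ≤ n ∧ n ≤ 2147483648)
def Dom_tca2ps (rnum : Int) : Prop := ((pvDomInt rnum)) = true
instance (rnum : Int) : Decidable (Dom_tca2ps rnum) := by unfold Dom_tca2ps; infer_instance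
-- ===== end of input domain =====

-- B replaces A's reversed-bin-string scan and 's'-flag state machine by arithmetic base-512 chunking
-- (divmod) with a recursive divmod-by-2 digit helper (alternative decomposition, same cost).

-- ===== PORT A =====
def tca2ps (rnum : Int) : String :=
  let r0 : List Char := PySem.Int.toBinChars0b rnum                       -- r = bin(int(rnum))
  let r1 : List Char := (PySem.List.slice? r0 none (some 1) (-1)).getD [] -- r = r[:1:-1]
  let r2 : List Char := r1 ++ List.replicate (18 - r1.length) '0'         -- r += '0'*(18-len(r))
  -- rule = [i for x,i in zip(r, range(len(r))) if x=='1']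
  let rule : List Int :=
    (PySem.List.enumerate r2 0).foldr (fun xi acc => if xi.2 = '1' then xi.1 :: acc else acc) []
  -- acc0='b'; ps=1; for a in rule: …
  let st := rule.foldl (fun (st : List Char × Int) (a : Int) =>
      let st := if a > 8 ∧ st.2 = 1 then (st.1 ++ ['s'], (0:Int)) else st
      (st.1 ++ PySem.Int.toChars (PySem.Int.mod a 9), st.2)) (['b'], (1:Int))
  let al := if st.2 = 1 then st.1 ++ ['s'] else st.1
  String.mk al

-- ===== PORT B =====
-- chunk_digits(m, d): if m == 0 return ''; m2, bit = divmod(m, 2); return (str(d) if bit else '') + chunk_digits(m2, d+1)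
-- (m is a nonnegative Python int, so it is carried as a Nat; divmod(m,2) = (m/2, m%2) exactly)
def tca2psChunkDigits (m : Nat) (d : Int) : List Char :=
  if _h : m = 0 then []
  else (if m % 2 = 1 then PySem.Int.toChars d else []) ++ tca2psChunkDigits (m / 2) (d + 1)
decreasing_by exact Nat.div_lt_self (by omega) (by omega)

-- the 'while rest:' loop: rest, c = divmod(rest, 512); acc0 += chunk_digits(c, 0)
def tca2psChunkLoop (rest : Nat) (acc0 : List Char) : List Char :=
  if _h : rest = 0 then acc0
  else tca2psChunkLoop (rest / 512) (acc0 ++ tca2psChunkDigits (rest % 512) 0)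
decreasing_by exact Nat.div_lt_self (by omega) (by omega)

def tca2ps_alt (rnum : Int) : String :=
  let n : Nat := rnum.natAbs                               -- n = abs(int(rnum)), nonnegative
  let rest := n / 512                                      -- rest, low = divmod(n, 512)
  let low := n % 512
  let acc0 := 'b' :: (tca2psChunkDigits low 0 ++ ['s'])   -- acc0 = 'b' + chunk_digits(low,0) + 's'
  String.mk (tca2psChunkLoop rest acc0)

-- ===== PRECONDITION & SPEC =====
def Spec_tca2ps (rnum : Int) (out : String) : Prop := out = tca2ps_alt rnum
instance (rnum : Int) (out : String) : Decidable (Spec_tca2ps rnum out) := by unfold Spec_tca2ps; infer_instance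

-- ===== CLAIM (what is proved, stated in full; the proofs are below) =====
def Claim_equal_tca2ps : Prop := ∀ (rnum : Int), Dom_tca2ps rnum → Spec_tca2ps rnum (tca2ps rnum)

-- ===== LEMMAS AND PROOFS =====

-- binary digits of m, least-significant first (what A's reversed bin string carries)
def pbits (m : Nat) : List Char :=
  Nat.digitChar (m % 2) :: (if h : m / 2 = 0 then [] else pbits (m / 2))
decreasing_by
  exact Nat.div_lt_self (by omega) (by omega)

-- the increasing list of set-bit positions of m, offset by s
def sbits (m : Nat) (s : Int) : List Int :=
  if h : m = 0 then []
  else if m % 2 = 1 then s :: sbits (m / 2) (s + 1) else sbits (m / 2) (s + 1)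
decreasing_by
  all_goals exact Nat.div_lt_self (by omega) (by omega)

-- the index comprehension, structurally
def ones : List Char → Int → List Int
  | [], _ => []
  | c :: cs, s => if c = '1' then s :: ones cs (s + 1) else ones cs (s + 1)

-- A's loop body, named
def stepA (st : List Char × Int) (a : Int) : List Char × Int :=
  let st := if a > 8 ∧ st.2 = 1 then (st.1 ++ ['s'], (0:Int)) else st
  (st.1 ++ PySem.Int.toChars (PySem.Int.mod a 9), st.2)

lemma toDigitsCore_eq_pbits : ∀ (f m : Nat) (l : List Char), m < f →
    Nat.toDigitsCore 2 f m l = (pbits m).reverse ++ l := by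
  intro f
  induction f with
  | zero => intro m l h; omega
  | succ f ih =>
    intro m l _
    rw [Nat.toDigitsCore]
    by_cases h2 : m / 2 = 0
    · rw [if_pos h2]
      conv_rhs => rw [pbits, dif_pos h2]
      simp
    · rw [if_neg h2, ih (m / 2) _ (by omega)]
      conv_rhs => rw [pbits, dif_neg h2]
      simp

lemma toDigits_two (m : Nat) : Nat.toDigits 2 m = (pbits m).reverse := by
  rw [Nat.toDigits, toDigitsCore_eq_pbits _ _ _ (by omega), List.append_nil]

lemma filterMap_getElem?_range {α : Type} (l : List α) :
    List.filterMap (fun k => l[k]?) (List.range l.length) = l := by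
  induction l using List.reverseRecOn with
  | nil => simp
  | append_singleton l x ih =>
    rw [List.length_append, List.length_cons, List.length_nil, List.range_succ,
      List.filterMap_append]
    have h1 : ∀ k ∈ List.range l.length, (l ++ [x])[k]? = l[k]? := by
      intro k hk
      exact List.getElem?_append_left (List.mem_range.mp hk)
    rw [List.filterMap_congr h1, ih]
    simp

-- r[:1:-1] is the reverse of everything past the first two characters
lemma slice_rev2 {α : Type} (xs : List α) :
    PySem.List.slice? xs none (some 1) (-1) = some ((xs.drop 2).reverse) := by
  simp only [PySem.List.slice?, PySem.List.sliceIndices]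
  norm_num
  rcases xs with _ | ⟨a, _ | ⟨b, t⟩⟩
  · simp
  · simp
  · simp only [List.length_cons, List.drop_succ_cons, List.drop_zero]
    have hcnt : ((↑(t.length + 1 + 1) : Int) - 1 - min 1 ((↑(t.length + 1 + 1) : Int) - 1)).toNat
        = t.length := by omega
    rw [hcnt]
    have hif : (if 2 < t.length + 1 + 1 then t.length else 0) = t.length := by
      by_cases h : 2 < t.length + 1 + 1 <;> simp [h] <;> omega
    rw [hif]
    have hstep : ∀ k ∈ List.range t.length,
        (a :: b :: t)[((↑(t.length + 1 + 1) : Int) - 1 + -(k : Int)).toNat]? = t.reverse[k]? := by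
      intro k hk
      have hk' : k < t.length := List.mem_range.mp hk
      have hidx : ((↑(t.length + 1 + 1) : Int) - 1 + -(k : Int)).toNat = (t.length - 1 - k) + 2 := by
        omega
      rw [hidx]
      simp only [List.getElem?_cons_succ]
      rw [List.getElem?_eq_getElem (by omega), List.getElem?_eq_getElem (by simpa using hk')]
      congr 1
      rw [List.getElem_reverse]
    rw [List.filterMap_congr hstep]
    rw [show t.length = t.reverse.length by simp]
    exact filterMap_getElem?_range t.reverse

lemma rule_eq_ones : ∀ (cs : List Char) (s : Int),
    (PySem.List.enumerate cs s).foldr (fun xi acc => if xi.2 = '1' then xi.1 :: acc else acc) [] = ones cs s := by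
  intro cs
  induction cs with
  | nil => intro s; simp [PySem.List.enumerate_nil, ones]
  | cons c cs ih =>
    intro s
    rw [PySem.List.enumerate_cons, List.foldr_cons, ih, ones]

lemma ones_eq_nil (tail : List Char) (h : ∀ c ∈ tail, c ≠ '1') : ∀ s, ones tail s = [] := by
  induction tail with
  | nil => intro s; rfl
  | cons c cs ih =>
    intro s
    have hc : c ≠ '1' := h c (by simp)
    rw [ones, if_neg hc]
    exact ih (fun x hx => h x (by simp [hx])) _

lemma ones_append (cs tail : List Char) (h : ∀ c ∈ tail, c ≠ '1') :
    ∀ s, ones (cs ++ tail) s = ones cs s := by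
  induction cs with
  | nil => intro s; simpa using ones_eq_nil tail h s
  | cons c cs ih =>
    intro s
    rw [List.cons_append, ones, ones, ih]

lemma ones_pbits (m : Nat) : ∀ s, ones (pbits m) s = sbits m s := by
  induction m using Nat.strong_induction_on with
  | _ m ih =>
    intro s
    rw [pbits, sbits]
    by_cases h0 : m = 0
    · subst h0
      rw [dif_pos rfl, dif_pos rfl, ones, if_neg (by decide)]
      rfl
    · simp only [h0, dif_neg, not_false_iff]
      have hd : Nat.digitChar (m % 2) = '1' ↔ m % 2 = 1 := by
        rcases Nat.mod_two_eq_zero_or_one m with h | h <;> simp [h, Nat.digitChar]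
      by_cases h2 : m / 2 = 0
      · simp only [h2, dif_pos]
        rw [ones]
        by_cases hm : m % 2 = 1
        · rw [if_pos (hd.mpr hm), if_pos hm]
          simp [ones, sbits, h2]
        · rw [if_neg (fun hc => hm (hd.mp hc)), if_neg hm]
          simp [ones, sbits, h2]
      · simp only [h2, dif_neg, not_false_iff]
        rw [ones]
        have ihh := ih (m / 2) (Nat.div_lt_self (by omega) (by omega)) (s + 1)
        by_cases hm : m % 2 = 1
        · rw [if_pos (hd.mpr hm), if_pos hm, ihh]
        · rw [if_neg (fun hc => hm (hd.mp hc)), if_neg hm, ihh]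

lemma mem_sbits : ∀ (m : Nat) (s a : Int), a ∈ sbits m s ↔ ∃ i : Nat, a = s + i ∧ m / 2 ^ i % 2 = 1 := by
  intro m
  induction m using Nat.strong_induction_on with
  | _ m ih =>
    intro s a
    rw [sbits]
    by_cases h0 : m = 0
    · subst h0; simp
    · simp only [h0, dif_neg, not_false_iff]
      have ihh := ih (m / 2) (Nat.div_lt_self (by omega) (by omega)) (s + 1) a
      have hstep : ∀ i : Nat, m / 2 / 2 ^ i = m / 2 ^ (i + 1) := by
        intro i
        rw [Nat.div_div_eq_div_mul]
        congr 1
        rw [pow_succ]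
        ring
      constructor
      · intro hmem
        by_cases hm : m % 2 = 1
        · rw [if_pos hm] at hmem
          rcases List.mem_cons.mp hmem with rfl | hmem
          · exact ⟨0, by simp, by simpa using hm⟩
          · obtain ⟨i, hi, hb⟩ := ihh.mp hmem
            exact ⟨i + 1, by push_cast; omega, by rw [← hstep]; exact hb⟩
        · rw [if_neg hm] at hmem
          obtain ⟨i, hi, hb⟩ := ihh.mp hmem
          exact ⟨i + 1, by push_cast; omega, by rw [← hstep]; exact hb⟩
      · rintro ⟨i, rfl, hb⟩
        rcases i with _ | i
        · have hm : m % 2 = 1 := by simpa using hb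
          rw [if_pos hm]; simp
        · have hmem : s + (↑i + 1) ∈ sbits (m / 2) (s + 1) := by
            apply ihh.mpr
            exact ⟨i, by push_cast; ring, by rw [hstep]; exact hb⟩
          have : (s + (↑(i + 1) : Int)) = s + (↑i + 1) := by push_cast; ring
          rw [this]
          by_cases hm : m % 2 = 1
          · rw [if_pos hm]; exact List.mem_cons_of_mem _ hmem
          · rw [if_neg hm]; exact hmem

lemma le_of_mem_sbits {m : Nat} {s a : Int} (h : a ∈ sbits m s) : s ≤ a := by
  obtain ⟨i, rfl, _⟩ := (mem_sbits m s a).mp h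
  omega

lemma sbits_pairwise : ∀ (m : Nat) (s : Int), (sbits m s).Pairwise (· < ·) := by
  intro m
  induction m using Nat.strong_induction_on with
  | _ m ih =>
    intro s
    rw [sbits]
    by_cases h0 : m = 0
    · simp [h0]
    · simp only [h0, dif_neg, not_false_iff]
      have ihh := ih (m / 2) (Nat.div_lt_self (by omega) (by omega)) (s + 1)
      by_cases hm : m % 2 = 1
      · rw [if_pos hm]
        exact List.pairwise_cons.mpr ⟨fun a ha => by have := le_of_mem_sbits ha; omega, ihh⟩
      · rw [if_neg hm]; exact ihh

-- A's loop once ps = 0: it only appends digits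
lemma foldA_ps0 : ∀ (L : List Int) (al : List Char),
    L.foldl stepA (al, 0) = (al ++ L.flatMap (fun a => PySem.Int.toChars (PySem.Int.mod a 9)), 0) := by
  intro L
  induction L with
  | nil => intro al; simp
  | cons a L ih =>
    intro al
    rw [List.foldl_cons]
    have : stepA (al, 0) a = (al ++ PySem.Int.toChars (PySem.Int.mod a 9), 0) := by
      simp [stepA]
    rw [this, ih]
    simp

-- A's loop from ps = 1 over a strictly increasing list, with the final 's' patch
lemma foldA_main : ∀ (L : List Int) (al : List Char), L.Pairwise (· < ·) →
    (let r := L.foldl stepA (al, 1); if r.2 = 1 then r.1 ++ ['s'] else r.1) =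
      al ++ (L.filter (fun a => decide (a ≤ 8))).flatMap (fun a => PySem.Int.toChars (PySem.Int.mod a 9))
         ++ 's' :: (L.filter (fun a => decide (8 < a))).flatMap (fun a => PySem.Int.toChars (PySem.Int.mod a 9)) := by
  intro L
  induction L with
  | nil => intro al _; simp
  | cons a L ih =>
    intro al hp
    obtain ⟨ha, hpL⟩ := List.pairwise_cons.mp hp
    by_cases h8 : a ≤ 8
    · have hstep : stepA (al, 1) a = (al ++ PySem.Int.toChars (PySem.Int.mod a 9), 1) := by
        have h8' : ¬ (8:Int) < a := by omega
        simp [stepA, h8']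
      simp only [List.foldl_cons, hstep]
      rw [ih _ hpL]
      have hd1 : (a :: L).filter (fun a => decide (a ≤ 8)) = a :: L.filter (fun a => decide (a ≤ 8)) := by
        simp [List.filter_cons, h8]
      have hd2 : (a :: L).filter (fun a => decide (8 < a)) = L.filter (fun a => decide (8 < a)) := by
        rw [List.filter_cons]
        simp only [decide_eq_true_eq]
        rw [if_neg (by omega)]
      rw [hd1, hd2]
      simp
    · have hstep : stepA (al, 1) a = (al ++ 's' :: PySem.Int.toChars (PySem.Int.mod a 9), 0) := by
        have h8' : (8:Int) < a := by omega
        simp [stepA, h8']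
      simp only [List.foldl_cons, hstep]
      rw [foldA_ps0]
      have hfilt1 : (a :: L).filter (fun a => decide (a ≤ 8)) = [] := by
        rw [List.filter_cons, if_neg (by simp only [decide_eq_true_eq]; omega)]
        apply List.filter_eq_nil_iff.mpr
        intro b hb
        have := ha b hb
        simp only [decide_eq_true_eq]
        omega
      have hfilt2 : (a :: L).filter (fun a => decide (8 < a)) = a :: L := by
        apply List.filter_eq_self.mpr
        intro b hb
        rcases List.mem_cons.mp hb with rfl | hb
        · simp; omega
        · have := ha b hb; simp; omega
      rw [hfilt1, hfilt2]
      simp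

lemma flatMap_mod9_eq (L : List Int) (h : ∀ a ∈ L, 0 ≤ a ∧ a < 9) :
    L.flatMap (fun a => PySem.Int.toChars (PySem.Int.mod a 9)) = L.flatMap PySem.Int.toChars := by
  apply List.flatMap_congr
  intro a ha
  obtain ⟨h0, h9⟩ := h a ha
  congr 1
  rw [PySem.Int.mod, Int.fmod_eq_emod, if_pos (Or.inl (by norm_num)), add_zero,
    Int.emod_eq_of_lt h0 (by omega)]

lemma list_eq_of_sorted_mem {l₁ l₂ : List Int} (h₁ : l₁.Pairwise (· < ·)) (h₂ : l₂.Pairwise (· < ·))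
    (hmem : ∀ a, a ∈ l₁ ↔ a ∈ l₂) : l₁ = l₂ := by
  have n₁ : l₁.Nodup := h₁.imp (fun h => ne_of_lt h)
  have n₂ : l₂.Nodup := h₂.imp (fun h => ne_of_lt h)
  have hperm : l₁.Perm l₂ := (List.perm_ext_iff_of_nodup n₁ n₂).mpr hmem
  exact List.eq_of_perm_of_sorted (fun a b _ _ hab hba => by omega) h₁ h₂ hperm

-- ===== B-side lemmas =====

-- the recursive chunk helper emits exactly the digits of the set-bit positions (offset d)
lemma chunkDigits_eq_sbits (m : Nat) : ∀ d, tca2psChunkDigits m d = (sbits m d).flatMap PySem.Int.toChars := by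
  induction m using Nat.strong_induction_on with
  | _ m ih =>
    intro d
    rw [tca2psChunkDigits, sbits]
    by_cases h0 : m = 0
    · simp [h0]
    · simp only [h0, dif_neg, not_false_iff]
      have ihh := ih (m / 2) (Nat.div_lt_self (by omega) (by omega)) (d + 1)
      by_cases hm : m % 2 = 1
      · rw [if_pos hm, if_pos hm, ihh, List.flatMap_cons]
      · rw [if_neg hm, if_neg hm, ihh, List.nil_append]

lemma sbits_lt_of_mod (r : Nat) {a : Int} (h : a ∈ sbits (r % 512) 0) : a < 9 := by
  obtain ⟨i, rfl, hb⟩ := (mem_sbits _ _ _).mp h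
  by_contra hge
  have hi : 9 ≤ i := by omega
  have : r % 512 < 2 ^ i :=
    lt_of_lt_of_le (Nat.mod_lt _ (by omega)) (by calc (512:Nat) = 2^9 := by norm_num
                                                   _ ≤ 2^i := Nat.pow_le_pow_right (by omega) hi)
  rw [Nat.div_eq_of_lt this] at hb
  omega

lemma bit_mod_512 (r i : Nat) (hi : i < 9) : r % 512 / 2 ^ i % 2 = r / 2 ^ i % 2 := by
  have h := Nat.testBit_mod_two_pow r 9 i
  rw [Nat.testBit_eq_decide_div_mod_eq, Nat.testBit_eq_decide_div_mod_eq] at h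
  have h512 : (512:Nat) = 2 ^ 9 := by norm_num
  rw [h512]
  have e1 := Nat.mod_two_eq_zero_or_one (r % 2 ^ 9 / 2 ^ i)
  have e2 := Nat.mod_two_eq_zero_or_one (r / 2 ^ i)
  simp only [hi, decide_true, Bool.true_and, decide_eq_decide] at h
  omega

lemma bit_div_512 (r j : Nat) : r / 512 / 2 ^ j = r / 2 ^ (j + 9) := by
  rw [Nat.div_div_eq_div_mul]
  congr 1
  rw [show (512:Nat) = 2 ^ 9 by norm_num, ← pow_add]
  congr 1
  omega

-- splitting off the low base-512 chunk splits the set-bit positions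
lemma sbits_split (r : Nat) : sbits r 0 = sbits (r % 512) 0 ++ (sbits (r / 512) 0).map (· + 9) := by
  apply list_eq_of_sorted_mem (sbits_pairwise r 0)
  · rw [List.pairwise_append]
    refine ⟨sbits_pairwise _ _, ?_, ?_⟩
    · exact (sbits_pairwise _ _).map _ (fun hab => by omega)
    · intro a ha b hb
      obtain ⟨c, hc, rfl⟩ := List.mem_map.mp hb
      have h1 := sbits_lt_of_mod r ha
      have h2 := le_of_mem_sbits hc
      omega
  · intro a
    rw [List.mem_append, List.mem_map, mem_sbits]
    constructor
    · rintro ⟨i, rfl, hb⟩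
      by_cases hi : i < 9
      · left
        rw [mem_sbits]
        exact ⟨i, rfl, by rw [bit_mod_512 r i hi]; exact hb⟩
      · right
        refine ⟨(0:Int) + (i - 9 : Nat), ?_, by push_cast; omega⟩
        rw [mem_sbits]
        refine ⟨i - 9, rfl, ?_⟩
        rw [bit_div_512, show i - 9 + 9 = i by omega]
        exact hb
    · rintro (h | ⟨c, hc, rfl⟩)
      · obtain ⟨i, rfl, hb⟩ := (mem_sbits _ _ _).mp h
        have hi : i < 9 := by
          have := sbits_lt_of_mod r h
          omega
        exact ⟨i, rfl, by rw [← bit_mod_512 r i hi]; exact hb⟩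
      · obtain ⟨j, rfl, hb⟩ := (mem_sbits _ _ _).mp hc
        refine ⟨j + 9, by push_cast; omega, ?_⟩
        rw [← bit_div_512]
        exact hb

-- the while loop appends, per chunk, the digits (position mod 9) of the remaining set bits
lemma chunkLoop_eq (r : Nat) : ∀ acc, tca2psChunkLoop r acc =
    acc ++ (sbits r 0).flatMap (fun p => PySem.Int.toChars (PySem.Int.mod p 9)) := by
  induction r using Nat.strong_induction_on with
  | _ r ih =>
    intro acc
    rw [tca2psChunkLoop]
    by_cases h0 : r = 0
    · simp [h0, sbits]
    · simp only [h0, dif_neg, not_false_iff]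
      rw [ih (r / 512) (Nat.div_lt_self (by omega) (by omega))]
      rw [sbits_split r, List.flatMap_append, List.flatMap_map]
      have hlow : (sbits (r % 512) 0).flatMap (fun p => PySem.Int.toChars (PySem.Int.mod p 9)) =
          tca2psChunkDigits (r % 512) 0 := by
        rw [flatMap_mod9_eq _ (fun a ha => ⟨le_of_mem_sbits ha, sbits_lt_of_mod r ha⟩),
          chunkDigits_eq_sbits]
      have hhigh : (sbits (r / 512) 0).flatMap (fun a => PySem.Int.toChars (PySem.Int.mod (a + 9) 9)) =
          (sbits (r / 512) 0).flatMap (fun p => PySem.Int.toChars (PySem.Int.mod p 9)) := by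
        apply List.flatMap_congr
        intro a ha
        have h0a := le_of_mem_sbits ha
        congr 1
        rw [PySem.Int.mod, PySem.Int.mod, Int.fmod_eq_emod, Int.fmod_eq_emod]
        rw [if_pos (Or.inl (by norm_num)), if_pos (Or.inl (by norm_num))]
        omega
      rw [hlow, hhigh, List.append_assoc]

-- the two filtered halves of A's digit list are B's low chunk and shifted high chunks
lemma filter_le8_eq (m : Nat) :
    (sbits m 0).filter (fun a => decide (a ≤ 8)) = sbits (m % 512) 0 := by
  rw [sbits_split m, List.filter_append]
  have h1 : (sbits (m % 512) 0).filter (fun a => decide (a ≤ 8)) = sbits (m % 512) 0 := by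
    apply List.filter_eq_self.mpr
    intro a ha
    have := sbits_lt_of_mod m ha
    simp only [decide_eq_true_eq]
    omega
  have h2 : ((sbits (m / 512) 0).map (· + 9)).filter (fun a => decide (a ≤ 8)) = [] := by
    apply List.filter_eq_nil_iff.mpr
    intro a ha
    obtain ⟨c, hc, rfl⟩ := List.mem_map.mp ha
    have := le_of_mem_sbits hc
    simp only [decide_eq_true_eq]
    omega
  rw [h1, h2, List.append_nil]

lemma filter_gt8_eq (m : Nat) :
    (sbits m 0).filter (fun a => decide (8 < a)) = (sbits (m / 512) 0).map (· + 9) := by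
  rw [sbits_split m, List.filter_append]
  have h1 : (sbits (m % 512) 0).filter (fun a => decide (8 < a)) = [] := by
    apply List.filter_eq_nil_iff.mpr
    intro a ha
    have := sbits_lt_of_mod m ha
    simp only [decide_eq_true_eq]
    omega
  have h2 : ((sbits (m / 512) 0).map (· + 9)).filter (fun a => decide (8 < a)) =
      (sbits (m / 512) 0).map (· + 9) := by
    apply List.filter_eq_self.mpr
    intro a ha
    obtain ⟨c, hc, rfl⟩ := List.mem_map.mp ha
    have := le_of_mem_sbits hc
    simp only [decide_eq_true_eq]
    omega
  rw [h1, h2, List.nil_append]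

theorem tca2ps_eq_alt (rnum : Int) : tca2ps rnum = tca2ps_alt rnum := by
  unfold tca2ps tca2ps_alt
  simp only []
  set m : Nat := rnum.natAbs with hm
  -- the reversed, de-prefixed bin string is pbits m plus non-'1' junk
  have hr1 : ∃ tail : List Char, (∀ c ∈ tail, c ≠ '1') ∧
      ((PySem.List.slice? (PySem.Int.toBinChars0b rnum) none (some 1) (-1)).getD []) = pbits m ++ tail := by
    rw [slice_rev2]
    rw [PySem.Int.toBinChars0b]
    by_cases hneg : rnum < 0
    · refine ⟨['b'], by intro c hc; rw [List.mem_singleton] at hc; subst hc; decide, ?_⟩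
      rw [if_pos hneg]
      rw [show List.drop 2 ('-' :: '0' :: 'b' :: Nat.toDigits 2 rnum.natAbs) = 'b' :: Nat.toDigits 2 rnum.natAbs from rfl]
      rw [show ('b' :: Nat.toDigits 2 rnum.natAbs).reverse = (Nat.toDigits 2 rnum.natAbs).reverse ++ ['b'] by simp]
      rw [toDigits_two, List.reverse_reverse, Option.getD_some]
    · refine ⟨[], by simp, ?_⟩
      rw [if_neg hneg]
      rw [show List.drop 2 ('0' :: 'b' :: Nat.toDigits 2 rnum.toNat) = Nat.toDigits 2 rnum.toNat from rfl]
      rw [show rnum.toNat = m by omega]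
      rw [toDigits_two, List.reverse_reverse, Option.getD_some, List.append_nil]
  obtain ⟨tail, htail, hr1⟩ := hr1
  rw [hr1]
  -- rule = sbits m 0
  have hrule :
      (PySem.List.enumerate ((pbits m ++ tail) ++ List.replicate (18 - (pbits m ++ tail).length) '0') 0).foldr
        (fun xi acc => if xi.2 = '1' then xi.1 :: acc else acc) [] = sbits m 0 := by
    rw [rule_eq_ones]
    rw [List.append_assoc]
    rw [ones_append _ _ ?_ 0]
    · exact ones_pbits m 0
    · intro c hc
      rcases List.mem_append.mp hc with hc | hc
      · exact htail c hc
      · rw [List.eq_of_mem_replicate hc]; decide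
  rw [hrule]
  -- the flag loop over the sorted rule list
  have hfold := foldA_main (sbits m 0) ['b'] (sbits_pairwise m 0)
  simp only [] at hfold
  have hfold' : (if ((sbits m 0).foldl stepA (['b'], 1)).2 = 1
        then ((sbits m 0).foldl stepA (['b'], 1)).1 ++ ['s']
        else ((sbits m 0).foldl stepA (['b'], 1)).1) =
      ['b'] ++ ((sbits m 0).filter (fun a => decide (a ≤ 8))).flatMap (fun a => PySem.Int.toChars (PySem.Int.mod a 9))
         ++ 's' :: ((sbits m 0).filter (fun a => decide (8 < a))).flatMap (fun a => PySem.Int.toChars (PySem.Int.mod a 9)) := hfold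
  have hstepA : (fun (st : List Char × Int) (a : Int) =>
      let st := if a > 8 ∧ st.2 = 1 then (st.1 ++ ['s'], (0:Int)) else st
      (st.1 ++ PySem.Int.toChars (PySem.Int.mod a 9), st.2)) = stepA := rfl
  rw [hstepA, hfold']
  -- B's side: expand the while loop
  rw [chunkLoop_eq]
  -- identify the pieces
  rw [filter_le8_eq, filter_gt8_eq]
  have hlow : (sbits (m % 512) 0).flatMap (fun a => PySem.Int.toChars (PySem.Int.mod a 9)) =
      tca2psChunkDigits (m % 512) 0 := by
    rw [flatMap_mod9_eq _ (fun a ha => ⟨le_of_mem_sbits ha, sbits_lt_of_mod m ha⟩),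
      chunkDigits_eq_sbits]
  have hhigh : ((sbits (m / 512) 0).map (· + 9)).flatMap (fun a => PySem.Int.toChars (PySem.Int.mod a 9)) =
      (sbits (m / 512) 0).flatMap (fun p => PySem.Int.toChars (PySem.Int.mod p 9)) := by
    rw [List.flatMap_map]
    apply List.flatMap_congr
    intro a ha
    have h0a := le_of_mem_sbits ha
    congr 1
    rw [PySem.Int.mod, PySem.Int.mod, Int.fmod_eq_emod, Int.fmod_eq_emod]
    rw [if_pos (Or.inl (by norm_num)), if_pos (Or.inl (by norm_num))]
    omega
  rw [hlow, hhigh]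
  show _ = String.mk _
  congr 1
  simp

-- ===== VERDICT (by name: the statement is the Claim_ definition above) =====
theorem tca2ps_spec : Claim_equal_tca2ps := by
  intro rnum _
  unfold Spec_tca2ps
  exact tca2ps_eq_alt rnum
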